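-- pv_equiv track=rewrite | github.com/jknight1725/statePattern | pyState.py | v_c_pattern
-- ===== SOURCE A (Python) =====
-- def is_vowel(c):
--     if c in "aeiouy":
--         return True
--     else:
--         return False
--
-- def is_consonant(c):
--     if not is_vowel(c):
--         return True
--     else:
--         return False
--
-- def v_c_pattern(s):
--     for c in range(0, len(s), 2):
--         if is_vowel(s[c]):
--             if c + 1 >= len(s):
--                 return True
--             if is_consonant(s[c + 1]):
--                 continue
--             else:
--                 return False
--         else:
--             return False
--     return True
-- ===== SOURCE B (Python) =====
-- def v_c_pattern(s):
--     # One pass over enumerate: a char's vowel-ness must coincide with its index being even.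
--     return all((c in "aeiouy") == (i % 2 == 0) for i, c in enumerate(s))
-- ===== Notes on version B (the rewrite author's own statement) =====
-- stated objective: idiomatic
-- what changed: Replaces the step-2 index loop with lookahead and early returns by a single all() over enumerate testing that vowel-ness equals index-parity.
import Mathlib
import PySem

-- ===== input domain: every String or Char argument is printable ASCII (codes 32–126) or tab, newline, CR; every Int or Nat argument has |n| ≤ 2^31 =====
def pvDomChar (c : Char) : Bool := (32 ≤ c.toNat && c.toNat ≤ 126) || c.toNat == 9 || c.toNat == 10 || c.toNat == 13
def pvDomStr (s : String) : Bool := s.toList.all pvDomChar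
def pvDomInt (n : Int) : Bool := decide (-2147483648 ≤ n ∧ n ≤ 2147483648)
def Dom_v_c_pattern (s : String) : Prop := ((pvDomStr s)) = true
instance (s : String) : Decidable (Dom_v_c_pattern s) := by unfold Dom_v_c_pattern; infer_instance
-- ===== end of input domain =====

-- B replaces A's step-2 index loop (with lookahead and early returns) by a single
-- all() over enumerate: vowel-ness must equal index-parity. Same value on every string.

-- ===== PORT A =====
def pvIsVowel (c : Char) : Bool := if "aeiouy".toList.contains c then true else false

def pvIsConsonant (c : Char) : Bool := if !pvIsVowel c then true else false

-- A's 'for c in range(0, len(s), 2)' loop with early returns, transcribed as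
-- structural recursion consuming the current char and its lookahead neighbour.
def pvLoopA : List Char → Bool
  | [] => true
  | [c] => if pvIsVowel c then true else false          -- c+1 >= len(s): return True
  | c :: d :: rest =>
      if pvIsVowel c then
        (if pvIsConsonant d then pvLoopA rest else false)
      else false

def v_c_pattern (s : String) : Bool := pvLoopA s.toList

-- ===== PORT B =====
def v_c_pattern_alt (s : String) : Bool :=
  (PySem.List.enumerate s.toList 0).all
    (fun p => (("aeiouy".toList.contains p.2) == decide (PySem.Int.mod p.1 2 = 0)))

-- ===== PRECONDITION & SPEC =====
def Spec_v_c_pattern (s : String) (out : Bool) : Prop := out = v_c_pattern_alt s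
instance (s : String) (out : Bool) : Decidable (Spec_v_c_pattern s out) := by unfold Spec_v_c_pattern; infer_instance

-- ===== CLAIM (what is proved, stated in full; the proofs are below) =====
def Claim_equal_v_c_pattern : Prop := ∀ (s : String), Dom_v_c_pattern s → Spec_v_c_pattern s (v_c_pattern s)

-- ===== LEMMAS AND PROOFS =====
lemma pv_key : ∀ (cs : List Char) (n : Nat),
    (PySem.List.enumerate cs (2 * (n : Int))).all
      (fun p => (("aeiouy".toList.contains p.2) == decide (PySem.Int.mod p.1 2 = 0)))
    = pvLoopA cs
  | [], n => by
      simp [PySem.List.enumerate_nil, pvLoopA]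
  | [c], n => by
      have h0 : PySem.Int.mod (2 * (n : Int)) 2 = 0 := by
        rw [(by push_cast; ring : (2 * (n : Int)) = ((2 * n : Nat) : Int)),
            (by norm_num : (2 : Int) = ((2 : Nat) : Int)), PySem.Int.mod_natCast]
        simp [Nat.mul_mod_right]
      simp only [PySem.List.enumerate_cons, PySem.List.enumerate_nil, List.all_cons,
        List.all_nil, pvLoopA, pvIsVowel, h0]
      simp
  | c :: d :: rest, n => by
      have h0 : PySem.Int.mod (2 * (n : Int)) 2 = 0 := by
        rw [(by push_cast; ring : (2 * (n : Int)) = ((2 * n : Nat) : Int)),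
            (by norm_num : (2 : Int) = ((2 : Nat) : Int)), PySem.Int.mod_natCast]
        simp [Nat.mul_mod_right]
      have h1 : PySem.Int.mod (2 * (n : Int) + 1) 2 ≠ 0 := by
        rw [(by push_cast; ring : (2 * (n : Int) + 1) = ((2 * n + 1 : Nat) : Int)),
            (by norm_num : (2 : Int) = ((2 : Nat) : Int)), PySem.Int.mod_natCast]
        simp
      have h2 : (2 * (n : Int) + 1 + 1) = 2 * ((n + 1 : Nat) : Int) := by push_cast; ring
      have ih := pv_key rest (n + 1)
      rw [PySem.List.enumerate_cons, PySem.List.enumerate_cons, h2]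
      simp only [List.all_cons, ih, h0, h1, pvLoopA, pvIsVowel, pvIsConsonant]
      by_cases hc : "aeiouy".toList.contains c = true <;>
        by_cases hd : "aeiouy".toList.contains d = true <;>
          simp_all

-- ===== VERDICT (by name: the statement is the Claim_ definition above) =====
theorem v_c_pattern_spec : Claim_equal_v_c_pattern := by
  intro s _
  unfold Spec_v_c_pattern v_c_pattern v_c_pattern_alt
  have := pv_key s.toList 0
  simpa using this.symm
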